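-- pv_equiv track=rewrite | github.com/azirella-ltd/Autonomy-TMS | backend/app/services/disaggregation_service.py | _keys_match
-- ===== SOURCE A (Python) =====
-- def _keys_match(member_key: str, stored_key: str) -> bool:
--     """Check if member key matches stored key (with wildcards)."""
--     member_parts = member_key.split('_')
--     stored_parts = stored_key.split('_')
--
--     if len(member_parts) != len(stored_parts):
--         return False
--
--     for mp, sp in zip(member_parts, stored_parts):
--         if sp != '*' and mp != sp:
--             return False
--
--     return True
-- ===== SOURCE B (Python) =====
-- def _keys_match(member_key: str, stored_key: str) -> bool:
--     """Single forward scan over both keys: compare one '_'-delimited part at a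
--     time (a stored part '*' matches anything), without building part lists."""
--     i = j = 0
--     while True:
--         ni = member_key.find('_', i)
--         nj = stored_key.find('_', j)
--         mh = member_key[i:] if ni < 0 else member_key[i:ni]
--         sh = stored_key[j:] if nj < 0 else stored_key[j:nj]
--         if sh != '*' and mh != sh:
--             return False
--         if ni < 0 or nj < 0:
--             return (ni < 0) == (nj < 0)
--         i, j = ni + 1, nj + 1
-- ===== Notes on version B (the rewrite author's own statement) =====
-- stated objective: alternative
-- what changed: Replaced split-into-part-lists plus length-check-and-zip-loop by a single forward scan that compares one '_'-delimited part at a time with two cursors, building no intermediate lists.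
import Mathlib
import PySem

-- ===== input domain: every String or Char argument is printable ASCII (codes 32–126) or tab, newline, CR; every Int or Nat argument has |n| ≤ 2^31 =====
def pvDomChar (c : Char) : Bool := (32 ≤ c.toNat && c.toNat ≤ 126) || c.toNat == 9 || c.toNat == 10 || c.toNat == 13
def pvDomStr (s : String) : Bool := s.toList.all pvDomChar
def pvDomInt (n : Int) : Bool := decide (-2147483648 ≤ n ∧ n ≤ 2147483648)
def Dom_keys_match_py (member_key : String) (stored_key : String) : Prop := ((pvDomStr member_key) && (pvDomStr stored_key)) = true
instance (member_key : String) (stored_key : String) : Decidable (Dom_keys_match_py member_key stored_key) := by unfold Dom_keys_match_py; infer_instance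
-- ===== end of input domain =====

-- B replaces A's split-into-part-lists + length-check + zip-loop by a single
-- two-cursor forward scan comparing one '_'-delimited part at a time (objective: alternative).

-- ===== PORT A =====
-- the for-loop over zip(member_parts, stored_parts)
def pvLoopA : List (List Char × List Char) → Bool
  | [] => true
  | (mp, sp) :: rest => if sp ≠ ['*'] ∧ mp ≠ sp then false else pvLoopA rest


def keys_match_py (member_key : String) (stored_key : String) : Bool :=
  let member_parts := PySem.Chars.splitOn member_key.toList ['_']
  let stored_parts := PySem.Chars.splitOn stored_key.toList ['_']
  if member_parts.length ≠ stored_parts.length then false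
  else pvLoopA (member_parts.zip stored_parts)

-- ===== PORT B =====
-- Source B's while-loop as structural recursion on the unprocessed suffixes: the
-- cursors i, j become the suffix lists m, s; member_key.find('_', i) < 0 iff
-- m.dropWhile (· ≠ '_') = [], and the part member_key[i:ni] is m.takeWhile (· ≠ '_').
def kmAux (m s : List Char) : Bool :=
  let mh := m.takeWhile (· ≠ '_')
  let sh := s.takeWhile (· ≠ '_')
  if sh ≠ ['*'] ∧ mh ≠ sh then false
  else
    match hm : m.dropWhile (· ≠ '_'), hs : s.dropWhile (· ≠ '_') with
    | [], [] => true
    | _ :: _, [] => false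
    | [], _ :: _ => false
    | _ :: mr, _ :: sr => kmAux mr sr
termination_by m.length
decreasing_by
  have h := List.length_dropWhile_le (fun c => decide (c ≠ '_')) m
  rw [hm] at h; simp at h; omega


def keys_match_py_alt (member_key : String) (stored_key : String) : Bool :=
  kmAux member_key.toList stored_key.toList

-- ===== PRECONDITION & SPEC =====
def Spec_keys_match_py (member_key : String) (stored_key : String) (out : Bool) : Prop := out = keys_match_py_alt member_key stored_key
instance (member_key : String) (stored_key : String) (out : Bool) : Decidable (Spec_keys_match_py member_key stored_key out) := by unfold Spec_keys_match_py; infer_instance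

-- ===== CLAIM (what is proved, stated in full; the proofs are below) =====
def Claim_equal_keys_match_py : Prop := ∀ (member_key : String) (stored_key : String), Dom_keys_match_py member_key stored_key → Spec_keys_match_py member_key stored_key (keys_match_py member_key stored_key)

-- ===== LEMMAS AND PROOFS =====
-- pvSplit: the list of '_'-delimited parts as B traverses them; proved equal to A's splitOn
def pvSplit (l : List Char) : List (List Char) :=
  match hm : l.dropWhile (· ≠ '_') with
  | [] => [l.takeWhile (· ≠ '_')]
  | _ :: r => l.takeWhile (· ≠ '_') :: pvSplit r
termination_by l.length
decreasing_by
  have h := List.length_dropWhile_le (fun c => decide (c ≠ '_')) l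
  rw [hm] at h; simp at h; omega

theorem pvSplit_of_nil (l : List Char) (h : l.dropWhile (· ≠ '_') = []) :
    pvSplit l = [l.takeWhile (· ≠ '_')] := by
  rw [pvSplit]
  split
  · rfl
  · next heq => rw [h] at heq; cases heq

theorem pvSplit_of_cons (l : List Char) (c : Char) (r : List Char)
    (h : l.dropWhile (· ≠ '_') = c :: r) :
    pvSplit l = l.takeWhile (· ≠ '_') :: pvSplit r := by
  rw [pvSplit]
  split
  · next heq => rw [h] at heq; cases heq
  · next heq => rw [h] at heq; cases heq; rfl

def pvPrep (p : List Char) : List (List Char) → List (List Char)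
  | [] => [p]
  | x :: xs => (p ++ x) :: xs

theorem pvSplit_ne_nil (l : List Char) : pvSplit l ≠ [] := by
  rw [pvSplit]; split <;> simp

theorem pvPrep_nil (xs : List (List Char)) (h : xs ≠ []) : pvPrep [] xs = xs := by
  cases xs with
  | nil => exact absurd rfl h
  | cons x xs => simp [pvPrep]

theorem pvSplit_cons_ne (c : Char) (rest : List Char) (hc : c ≠ '_') (p : List Char) :
    pvPrep p (pvSplit (c :: rest)) = pvPrep (p ++ [c]) (pvSplit rest) := by
  have hd : (c :: rest).dropWhile (· ≠ '_') = rest.dropWhile (· ≠ '_') := by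
    simp [List.dropWhile_cons, hc]
  have ht : (c :: rest).takeWhile (· ≠ '_') = c :: rest.takeWhile (· ≠ '_') := by
    simp [List.takeWhile_cons, hc]
  cases h : rest.dropWhile (· ≠ '_') with
  | nil =>
      rw [pvSplit_of_nil _ (hd.trans h), pvSplit_of_nil _ h, ht]
      simp [pvPrep]
  | cons d r =>
      rw [pvSplit_of_cons _ _ _ (hd.trans h), pvSplit_of_cons _ _ _ h, ht]
      simp [pvPrep]

theorem pvGo_spec (fuel : Nat) : ∀ (l cur : List Char) (acc : List (List Char)),
    l.length ≤ fuel →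
    PySem.Chars.splitOn.go ['_'] fuel l cur acc = acc.reverse ++ pvPrep cur.reverse (pvSplit l) := by
  induction fuel with
  | zero =>
      intro l cur acc h
      have : l = [] := by cases l <;> simp_all
      subst this
      rw [pvSplit_of_nil _ (by rfl)]
      simp [PySem.Chars.splitOn.go, pvPrep]
  | succ f ih =>
      intro l cur acc h
      cases l with
      | nil =>
          rw [pvSplit_of_nil _ (by rfl)]
          simp [PySem.Chars.splitOn.go, pvPrep]
      | cons c rest =>
          by_cases hc : c = '_'
          · subst hc
            have hpre : List.isPrefixOf ['_'] ('_' :: rest) = true := by simp [List.isPrefixOf]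
            rw [PySem.Chars.splitOn.go]
            simp only [hpre, if_pos]
            rw [ih _ _ _ (by simpa using Nat.le_of_succ_le_succ (by simpa using h))]
            have hd : ('_' :: rest).dropWhile (· ≠ '_') = '_' :: rest := by simp
            have ht : ('_' :: rest).takeWhile (· ≠ '_') = ([] : List Char) := by simp
            rw [pvSplit_of_cons _ _ _ hd, ht]
            have hdrop : List.drop ['_'].length ('_' :: rest) = rest := rfl
    
            rw [hdrop, List.reverse_nil, pvPrep_nil _ (pvSplit_ne_nil rest)]
            simp [pvPrep]
          · have hpre : List.isPrefixOf ['_'] (c :: rest) = false := by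
              simp [List.isPrefixOf]; exact fun hx => absurd hx.symm hc
            rw [PySem.Chars.splitOn.go]
            simp only [hpre, Bool.false_eq_true, if_neg, not_false_iff]
            rw [ih _ _ _ (by simpa using Nat.le_of_succ_le_succ (by simpa using h))]
            rw [pvSplit_cons_ne c rest hc]
            simp

theorem splitOn_single (l : List Char) : PySem.Chars.splitOn l ['_'] = pvSplit l := by
  rw [PySem.Chars.splitOn, pvGo_spec _ _ _ _ (by omega)]
  simp [pvPrep_nil _ (pvSplit_ne_nil l)]

theorem kmAux_nn (m s : List Char) (hm : m.dropWhile (· ≠ '_') = [])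
    (hs : s.dropWhile (· ≠ '_') = []) : kmAux m s =
    if s.takeWhile (· ≠ '_') ≠ ['*'] ∧ m.takeWhile (· ≠ '_') ≠ s.takeWhile (· ≠ '_') then false
    else true := by
  rw [kmAux]
  split
  · rfl
  · split <;> first | rfl | (next h1 h2 => rw [hm] at h1; cases h1) | (next h1 h2 => rw [hs] at h2; cases h2)

theorem kmAux_false (m s : List Char)
    (h : (m.dropWhile (· ≠ '_') = [] ∧ s.dropWhile (· ≠ '_') ≠ []) ∨
         (m.dropWhile (· ≠ '_') ≠ [] ∧ s.dropWhile (· ≠ '_') = [])) : kmAux m s = false := by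
  rw [kmAux]
  split
  · rfl
  · split
    · next h1 h2 => rcases h with ⟨_, hb⟩ | ⟨ha, _⟩
                    · exact absurd h2 hb
                    · exact absurd h1 ha
    · rfl
    · rfl
    · next h1 h2 => rcases h with ⟨ha, _⟩ | ⟨_, hb⟩
                    · rw [ha] at h1; cases h1
                    · rw [hb] at h2; cases h2

theorem kmAux_cc (m s : List Char) (c d : Char) (mr sr : List Char)
    (hm : m.dropWhile (· ≠ '_') = c :: mr) (hs : s.dropWhile (· ≠ '_') = d :: sr) : kmAux m s =
    if s.takeWhile (· ≠ '_') ≠ ['*'] ∧ m.takeWhile (· ≠ '_') ≠ s.takeWhile (· ≠ '_') then false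
    else kmAux mr sr := by
  rw [kmAux]
  split
  · rfl
  · split
    · next h1 h2 => rw [hm] at h1; cases h1
    · next h1 h2 => rw [hs] at h2; cases h2
    · next h1 h2 => rw [hm] at h1; cases h1
    · next h1 h2 => rw [hm] at h1; rw [hs] at h2; cases h1; cases h2; rfl

theorem pvSplit_len_pos (l : List Char) : 0 < (pvSplit l).length := by
  have := pvSplit_ne_nil l
  cases h : pvSplit l <;> simp_all

theorem main_lemma_aux (n : Nat) : ∀ (m s : List Char), m.length ≤ n →
    (if (pvSplit m).length ≠ (pvSplit s).length then false
     else pvLoopA ((pvSplit m).zip (pvSplit s))) = kmAux m s := by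
  induction n with
  | zero =>
      intro m s hm0
      have : m = [] := by cases m <;> simp_all
      subst this
      cases hs : List.dropWhile (· ≠ '_') s with
      | nil =>
          rw [kmAux_nn [] s (by rfl) hs, pvSplit_of_nil [] (by rfl), pvSplit_of_nil s hs]
          simp [pvLoopA]
      | cons d r =>
          rw [kmAux_false [] s (Or.inl ⟨by rfl, by rw [hs]; simp⟩),
            pvSplit_of_nil [] (by rfl), pvSplit_of_cons s d r hs]
          have hp := pvSplit_len_pos r
          have hne : ([List.takeWhile (· ≠ '_') []]).length ≠ (s.takeWhile (· ≠ '_') :: pvSplit r).length := by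
            simp only [List.length_cons, List.length_singleton, List.length_nil]; omega
          rw [if_pos hne]
  | succ n ih =>
      intro m s hmn
      cases hm : List.dropWhile (· ≠ '_') m with
      | nil =>
          cases hs : List.dropWhile (· ≠ '_') s with
          | nil =>
              rw [kmAux_nn m s hm hs, pvSplit_of_nil m hm, pvSplit_of_nil s hs]
              simp [pvLoopA]
          | cons d r =>
              rw [kmAux_false m s (Or.inl ⟨hm, by rw [hs]; simp⟩),
                pvSplit_of_nil m hm, pvSplit_of_cons s d r hs]
              have hp := pvSplit_len_pos r
              have hne : ([m.takeWhile (· ≠ '_')]).length ≠ (s.takeWhile (· ≠ '_') :: pvSplit r).length := by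
                simp only [List.length_cons, List.length_singleton, List.length_nil]; omega
              rw [if_pos hne]
      | cons c mr =>
          cases hs : List.dropWhile (· ≠ '_') s with
          | nil =>
              rw [kmAux_false m s (Or.inr ⟨by rw [hm]; simp, hs⟩),
                pvSplit_of_cons m c mr hm, pvSplit_of_nil s hs]
              have hp := pvSplit_len_pos mr
              have hne : (m.takeWhile (· ≠ '_') :: pvSplit mr).length ≠ ([s.takeWhile (· ≠ '_')]).length := by
                simp only [List.length_cons, List.length_singleton, List.length_nil]; omega
              rw [if_pos hne]
          | cons d r =>
              rw [kmAux_cc m s c d mr r hm hs,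
                pvSplit_of_cons m c mr hm, pvSplit_of_cons s d r hs]
              have hlen : mr.length ≤ n := by
                have h := List.length_dropWhile_le (fun c => decide (c ≠ '_')) m
                rw [hm] at h; simp at h; omega
              rw [← ih mr r hlen]
              by_cases hc : s.takeWhile (· ≠ '_') ≠ ['*'] ∧ m.takeWhile (· ≠ '_') ≠ s.takeWhile (· ≠ '_')
              · rw [if_pos hc]
                by_cases hl : (pvSplit mr).length = (pvSplit r).length
                · have h1 : ¬ (m.takeWhile (· ≠ '_') :: pvSplit mr).length ≠ (s.takeWhile (· ≠ '_') :: pvSplit r).length := by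
                    simp only [List.length_cons]; omega
                  rw [if_neg h1]
                  simp only [List.zip_cons_cons, pvLoopA]
                  rw [if_pos hc]
                · have h1 : (m.takeWhile (· ≠ '_') :: pvSplit mr).length ≠ (s.takeWhile (· ≠ '_') :: pvSplit r).length := by
                    simp only [List.length_cons]; omega
                  rw [if_pos h1]
              · rw [if_neg hc]
                by_cases hl : (pvSplit mr).length = (pvSplit r).length
                · have h1 : ¬ (m.takeWhile (· ≠ '_') :: pvSplit mr).length ≠ (s.takeWhile (· ≠ '_') :: pvSplit r).length := by
                    simp only [List.length_cons]; omega
                  rw [if_neg h1, if_neg (by omega)]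
                  simp only [List.zip_cons_cons, pvLoopA]
                  rw [if_neg hc]
                · have h1 : (m.takeWhile (· ≠ '_') :: pvSplit mr).length ≠ (s.takeWhile (· ≠ '_') :: pvSplit r).length := by
                    simp only [List.length_cons]; omega
                  rw [if_pos h1, if_pos hl]

-- ===== VERDICT (by name: the statement is the Claim_ definition above) =====
theorem keys_match_py_spec : Claim_equal_keys_match_py := by
  intro m s _
  unfold Spec_keys_match_py keys_match_py keys_match_py_alt
  simp only [splitOn_single]
  exact main_lemma_aux m.toList.length m.toList s.toList le_rfl
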